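-- pv_equiv track=rewrite | github.com/chetankamani/CS659-LAB-TASK | Week-1/rabit.dfs.py | dfs
-- ===== SOURCE A (Python) =====
-- def next_states(state):
--     s = list(state)
--     i = s.index('_')
--     if i - 1 >= 0 and s[i - 1] == '>':
--         t = s.copy(); t[i], t[i - 1] = t[i - 1], t[i]
--         yield ('> moves 1 right', ''.join(t))
--     if i + 1 < len(s) and s[i + 1] == '<':
--         t = s.copy(); t[i], t[i + 1] = t[i + 1], t[i]
--         yield ('< moves 1 left', ''.join(t))
--     if i - 2 >= 0 and s[i - 2] == '>' and s[i - 1] == '<':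
--         t = s.copy(); t[i], t[i - 2] = t[i - 2], t[i]
--         yield ('> jumps over <', ''.join(t))
--     if i + 2 < len(s) and s[i + 2] == '<' and s[i + 1] == '>':
--         t = s.copy(); t[i], t[i + 2] = t[i + 2], t[i]
--         yield ('< jumps over >', ''.join(t))
--
-- def dfs(start=">>>_<<<", goal="<<<_>>>"):
--     stack = [(start, [])]
--     visited = {start}
--     while stack:
--         state, path = stack.pop()
--         if state == goal:
--             return path
--         for move, nxt in reversed(list(next_states(state))):
--             if nxt not in visited:
--                 visited.add(nxt)
--                 stack.append((nxt, path + [(move, nxt)]))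
--     return None
-- ===== SOURCE B (Python) =====
-- def next_states(state):
--     s = list(state)
--     i = s.index('_')
--     if i - 1 >= 0 and s[i - 1] == '>':
--         t = s.copy(); t[i], t[i - 1] = t[i - 1], t[i]
--         yield ('> moves 1 right', ''.join(t))
--     if i + 1 < len(s) and s[i + 1] == '<':
--         t = s.copy(); t[i], t[i + 1] = t[i + 1], t[i]
--         yield ('< moves 1 left', ''.join(t))
--     if i - 2 >= 0 and s[i - 2] == '>' and s[i - 1] == '<':
--         t = s.copy(); t[i], t[i - 2] = t[i - 2], t[i]
--         yield ('> jumps over <', ''.join(t))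
--     if i + 2 < len(s) and s[i + 2] == '<' and s[i + 1] == '>':
--         t = s.copy(); t[i], t[i + 2] = t[i + 2], t[i]
--         yield ('< jumps over >', ''.join(t))
--
-- def dfs(start=">>>_<<<", goal="<<<_>>>"):
--     visited = {start}
--
--     def rec(state, path):
--         if state == goal:
--             return path
--         children = []
--         for move, nxt in next_states(state):
--             if nxt not in visited:
--                 visited.add(nxt)
--                 children.append((move, nxt))
--         for move, nxt in children:
--             result = rec(nxt, path + [(move, nxt)])
--             if result is not None:
--                 return result
--         return None
--
--     return rec(start, [])
-- ===== Notes on version B (the rewrite author's own statement) =====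
-- stated objective: alternative
-- what changed: The iterative DFS with an explicit stack of (state, path) frames is rewritten as a recursive preorder DFS: a nested rec(state, path) first collects-and-marks the unvisited children of a node (preserving the mark-at-expansion timing and next_states order), then recurses into them in order, returning the first non-None result.
import Mathlib
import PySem

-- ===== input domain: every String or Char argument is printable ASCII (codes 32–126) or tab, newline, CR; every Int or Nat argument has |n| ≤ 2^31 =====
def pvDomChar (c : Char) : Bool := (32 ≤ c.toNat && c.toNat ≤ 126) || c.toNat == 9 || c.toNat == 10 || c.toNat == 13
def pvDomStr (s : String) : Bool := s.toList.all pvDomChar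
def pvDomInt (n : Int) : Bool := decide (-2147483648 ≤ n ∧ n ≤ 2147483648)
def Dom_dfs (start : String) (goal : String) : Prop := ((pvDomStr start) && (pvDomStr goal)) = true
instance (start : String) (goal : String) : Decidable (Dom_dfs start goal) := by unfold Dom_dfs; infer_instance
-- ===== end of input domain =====

-- B rewrites the iterative stack-based DFS as a recursive preorder DFS with a shared
-- visited set (children collected and marked up front, then tried in order); same
-- next_states move generator, same returned path.

-- ===== PORT A =====

-- Python's simultaneous swap  t[i], t[j] = t[j], t[i]  (all uses are guarded in range,
-- so the getD default is never read).
def swapChars (s : List Char) (i j : Nat) : List Char :=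
  (s.set i (s.getD j ' ')).set j (s.getD i ' ')

-- Port of the module helper next_states (the generator, as the list of its yields).
-- Where Python would raise ValueError (no '_' in state) this returns []; dfs inputs
-- reaching that point are excluded by Pre_dfs.
def nextStatesCore (s : List Char) (i : Nat) : List (String × String) :=
         (if 1 ≤ i ∧ s.getD (i-1) ' ' = '>' then
            [("> moves 1 right", String.ofList (swapChars s i (i-1)))] else [])
      ++ (if i+1 < s.length ∧ s.getD (i+1) ' ' = '<' then
            [("< moves 1 left", String.ofList (swapChars s i (i+1)))] else [])
      ++ (if 2 ≤ i ∧ s.getD (i-2) ' ' = '>' ∧ s.getD (i-1) ' ' = '<' then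
            [("> jumps over <", String.ofList (swapChars s i (i-2)))] else [])
      ++ (if i+2 < s.length ∧ s.getD (i+2) ' ' = '<' ∧ s.getD (i+1) ' ' = '>' then
            [("< jumps over >", String.ofList (swapChars s i (i+2)))] else [])

-- s = list(state); i = s.index('_')
def nextStates (state : String) : List (String × String) :=
  match PySem.List.index? state.toList '_' with
  | none => []
  | some i => nextStatesCore state.toList i

-- A's while-loop; the Nat argument is a fuel bound used only as a totality guard
-- (proved sufficient below: pvLoopA_adequate), it changes no computed value.
def loopA (goal : String) : Nat → List (String × List (String × String)) → PySem.Set String →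
    Option (Option (List (String × String)))
  | 0, _, _ => none
  | f+1, stack, visited =>
    match PySem.List.pop? stack with
    | none => some none
    | some ((state, path), stack') =>
      if state = goal then some (some path)
      else
        let sv := ((nextStates state).reverse).foldl
          (fun (sv : List (String × List (String × String)) × PySem.Set String)
               (mn : String × String) =>
            if PySem.Set.contains sv.2 mn.2 then sv
            else (sv.1 ++ [(mn.2, path ++ [mn])], PySem.Set.add sv.2 mn.2))
          (stack', visited)
        loopA goal f sv.1 sv.2

def dfs (start : String) (goal : String) : Option (List (String × String)) :=
  match loopA goal (2 * start.length ^ start.length + 2) [(start, [])]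
      (PySem.Set.ofList [start]) with
  | some r => r
  | none => none     -- unreachable: the fuel guard is proved sufficient below

-- ===== PORT B =====

-- first loop of rec: collect the unvisited children, marking them visited as collected
def collectB (visited : PySem.Set String) (children : List (String × String)) :
    List (String × String) × PySem.Set String :=
  children.foldl
    (fun (cv : List (String × String) × PySem.Set String) (mn : String × String) =>
      if PySem.Set.contains cv.2 mn.2 then cv
      else (cv.1 ++ [mn], PySem.Set.add cv.2 mn.2))
    ([], visited)

-- rec / its second loop; the Nat fuel is only a totality guard (proved sufficient
-- below: pvRecB_adequate); the threaded Set is Python's shared mutable visited.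
mutual
def recB (goal : String) : Nat → String → List (String × String) → PySem.Set String →
    Option (Option (List (String × String)) × PySem.Set String)
  | 0, _, _, _ => none
  | f+1, state, path, visited =>
    if state = goal then some (some path, visited)
    else
      let cv := collectB visited (nextStates state)
      tryB goal f cv.1 path cv.2
termination_by f _ _ _ => (f, 0)

def tryB (goal : String) : Nat → List (String × String) → List (String × String) →
    PySem.Set String → Option (Option (List (String × String)) × PySem.Set String)
  | _, [], _, visited => some (none, visited)
  | f, mn :: cs, path, visited =>
    match recB goal f mn.2 (path ++ [mn]) visited with
    | none => none
    | some (some r, v') => some (some r, v')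
    | some (none, v') => tryB goal f cs path v'
termination_by f cs _ _ => (f, cs.length + 1)
end

def dfs_alt (start : String) (goal : String) : Option (List (String × String)) :=
  match recB goal (start.length ^ start.length + 1) start [] (PySem.Set.ofList [start]) with
  | some (r, _) => r
  | none => none     -- unreachable: the fuel guard is proved sufficient below

-- ===== PRECONDITION & SPEC =====
-- Pre_ excludes exactly the inputs where Python's dfs raises ValueError: a start with
-- no '_' that is not already the goal (next_states does s.index('_') on it).
def Pre_dfs (start : String) (goal : String) : Prop := start = goal ∨ '_' ∈ start.toList
instance (start : String) (goal : String) : Decidable (Pre_dfs start goal) := by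
  unfold Pre_dfs; infer_instance

def pvWitness_dfs : String × String := (">>>_<<<", "<<<_>>>")

def Spec_dfs (start : String) (goal : String) (out : Option (List (String × String))) : Prop :=
  out = dfs_alt start goal
instance (start : String) (goal : String) (out : Option (List (String × String))) :
    Decidable (Spec_dfs start goal out) := by unfold Spec_dfs; infer_instance

-- ===== CLAIM (what is proved, stated in full; the proofs are below) =====
def Claim_equal_dfs : Prop := ∀ (start : String) (goal : String), Dom_dfs start goal →
  Pre_dfs start goal → Spec_dfs start goal (dfs start goal)

-- ===== LEMMAS AND PROOFS =====

-- ---- generalities about swapChars / nextStates ----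

lemma swapChars_length (s : List Char) (i j : Nat) : (swapChars s i j).length = s.length := by
  simp [swapChars]

lemma swapChars_getElem (s : List Char) (i j k : Nat) (hi : i < s.length) (hj : j < s.length)
    (hk : k < (swapChars s i j).length) :
    (swapChars s i j)[k] = if k = j then s[i] else if k = i then s[j] else s[k]'(by
      simpa [swapChars_length] using hk) := by
  simp only [swapChars, List.getElem_set, List.getD_eq_getElem s ' ' hi,
    List.getD_eq_getElem s ' ' hj]
  split_ifs <;> first | rfl | omega

lemma swapChars_perm (s : List Char) (i j : Nat) (hi : i < s.length) (hj : j < s.length) :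
    (swapChars s i j).Perm s := by
  have h1 : i < s.toArray.size := by simpa using hi
  have h2 : j < s.toArray.size := by simpa using hj
  have hp := Array.swap_perm (xs := s.toArray) h1 h2
  rw [Array.perm_iff_toList_perm] at hp
  simpa [swapChars, Array.swap, List.getD_eq_getElem, hi, hj] using hp

lemma nextStates_perm {state : String} {mn : String × String} (h : mn ∈ nextStates state) :
    mn.2.toList.Perm state.toList := by
  unfold nextStates at h
  cases hidx : PySem.List.index? state.toList '_' with
  | none => rw [hidx] at h; simp at h
  | some i =>
    rw [hidx] at h
    unfold nextStatesCore at h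
    obtain ⟨hilt, -, -⟩ := PySem.List.getElem_of_index?_eq_some hidx
    simp only [List.mem_append, List.mem_ite_nil_right, List.mem_singleton] at h
    rcases h with ((⟨⟨h1, -⟩, he⟩ | ⟨⟨h1, -⟩, he⟩) | ⟨⟨h1, -, -⟩, he⟩) | ⟨⟨h1, -, -⟩, he⟩
    · subst he; simpa using swapChars_perm _ _ _ hilt (by omega)
    · subst he; simpa using swapChars_perm _ _ _ hilt h1
    · subst he; simpa using swapChars_perm _ _ _ hilt (by omega)
    · subst he; simpa using swapChars_perm _ _ _ hilt h1


lemma swapChars_ne (s : List Char) {i j1 j2 : Nat} (hi : i < s.length) (hj1 : j1 < s.length)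
    (hj2 : j2 < s.length) (k : Nat) (hk : k < s.length)
    (hval : (if k = j1 then s[i] else if k = i then s[j1]'hj1 else s[k]'hk) ≠
            (if k = j2 then s[i] else if k = i then s[j2]'hj2 else s[k]'hk)) :
    String.ofList (swapChars s i j1) ≠ String.ofList (swapChars s i j2) := by
  intro he
  rw [String.ofList_inj] at he
  have hk1 : k < (swapChars s i j1).length := by rw [swapChars_length]; exact hk
  have hgc : (swapChars s i j1)[k] = (swapChars s i j2)[k]'(by rw [← he]; exact hk1) :=
    List.getElem_of_eq he hk1
  rw [swapChars_getElem s i j1 k hi hj1, swapChars_getElem s i j2 k hi hj2] at hgc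
  exact hval hgc


lemma pvNodupAux (b1 b2 b3 b4 : Prop) [Decidable b1] [Decidable b2] [Decidable b3]
    [Decidable b4] (x1 x2 x3 x4 : String × String)
    (h12 : b1 → b2 → x1.2 ≠ x2.2) (h13 : b1 → b3 → x1.2 ≠ x3.2)
    (h14 : b1 → b4 → x1.2 ≠ x4.2) (h23 : b2 → b3 → x2.2 ≠ x3.2)
    (h24 : b2 → b4 → x2.2 ≠ x4.2) (h34 : b3 → b4 → x3.2 ≠ x4.2) :
    (List.map Prod.snd ((if b1 then [x1] else []) ++ (if b2 then [x2] else []) ++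
      (if b3 then [x3] else []) ++ (if b4 then [x4] else []))).Nodup := by
  split_ifs <;> simp_all <;> tauto

lemma nextStates_snd_nodup (state : String) : (List.map Prod.snd (nextStates state)).Nodup := by
  unfold nextStates
  cases hidx : PySem.List.index? state.toList '_' with
  | none => simp
  | some i =>
    obtain ⟨hilt, hval, -⟩ := PySem.List.getElem_of_index?_eq_some hidx
    unfold nextStatesCore
    dsimp only
    apply pvNodupAux
    · rintro ⟨hb1, hc1⟩ ⟨hb2, hc2⟩
      refine swapChars_ne state.toList hilt (by omega) hb2 i hilt ?_
      rw [List.getD_eq_getElem _ _ (by omega)] at hc1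
      rw [List.getD_eq_getElem _ _ hb2] at hc2
      simp only [show ¬(i = i - 1) by omega, show ¬(i = i + 1) by omega, if_neg, if_pos,
        if_true, if_false, eq_self_iff_true]
      simp [hc1, hc2]
    · rintro ⟨hb1, hc1⟩ ⟨hb3, hc3, hc3'⟩
      rw [hc1] at hc3'; simp at hc3'
    · rintro ⟨hb1, hc1⟩ ⟨hb4, hc4, hc4'⟩
      refine swapChars_ne state.toList hilt (by omega) hb4 i hilt ?_
      rw [List.getD_eq_getElem _ _ (by omega)] at hc1
      rw [List.getD_eq_getElem _ _ hb4] at hc4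
      simp only [show ¬(i = i - 1) by omega, show ¬(i = i + 2) by omega, if_neg, if_pos,
        if_true, if_false, eq_self_iff_true]
      simp [hc1, hc4]
    · rintro ⟨hb2, hc2⟩ ⟨hb3, hc3, hc3'⟩
      refine swapChars_ne state.toList hilt hb2 (by omega) i hilt ?_
      rw [List.getD_eq_getElem _ _ hb2] at hc2
      rw [List.getD_eq_getElem _ _ (by omega : i - 2 < state.toList.length)] at hc3
      simp only [show ¬(i = i + 1) by omega, show ¬(i = i - 2) by omega, if_neg, if_pos,
        if_true, if_false, eq_self_iff_true]
      simp [hc2, hc3]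
    · rintro ⟨hb2, hc2⟩ ⟨hb4, hc4, hc4'⟩
      rw [hc2] at hc4'; simp at hc4'
    · rintro ⟨hb3, hc3, hc3'⟩ ⟨hb4, hc4, hc4'⟩
      refine swapChars_ne state.toList hilt (by omega) hb4 i hilt ?_
      rw [List.getD_eq_getElem _ _ (by omega : i - 2 < state.toList.length)] at hc3
      rw [List.getD_eq_getElem _ _ hb4] at hc4
      simp only [show ¬(i = i - 2) by omega, show ¬(i = i + 2) by omega, if_neg, if_pos,
        if_true, if_false, eq_self_iff_true]
      simp [hc3, hc4]

-- ---- the universe of permutations of start, and the unseen-count measure ----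

def pvUniv (start : String) : Finset String := (start.toList.permutations.map String.ofList).toFinset

def pvUnseen (start : String) (v : List String) : Nat :=
  ((pvUniv start).filter (fun x => x ∉ v)).card

lemma mem_pvUniv {start x : String} : x ∈ pvUniv start ↔ x.toList.Perm start.toList := by
  simp only [pvUniv, List.mem_toFinset, List.mem_map, List.mem_permutations]
  constructor
  · rintro ⟨l, hl, rfl⟩; simpa using hl
  · intro h; exact ⟨x.toList, h, by simp⟩

lemma pvUnseen_le_pow (start : String) (v : List String) :
    pvUnseen start v ≤ start.length ^ start.length := by
  have h1 : pvUnseen start v ≤ (pvUniv start).card := Finset.card_filter_le _ _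
  have h2 : (pvUniv start).card ≤ (start.toList.permutations.map String.ofList).length :=
    List.toFinset_card_le _
  have h3 : (start.toList.permutations.map String.ofList).length
      = start.toList.length.factorial := by
    simp [List.length_permutations]
  have h4 : start.toList.length.factorial ≤ start.toList.length ^ start.toList.length :=
    Nat.factorial_le_pow _
  have h5 : start.toList.length = start.length := by simp
  rw [h5] at h3 h4
  omega

lemma pvUnseen_append {start : String} : ∀ (xs v : List String), xs.Nodup →
    (∀ x ∈ xs, x ∈ pvUniv start ∧ x ∉ v) →
    pvUnseen start (v ++ xs) + xs.length = pvUnseen start v := by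
  intro xs
  induction xs with
  | nil => intro v _ _; simp
  | cons x xs ih =>
    intro v hnd hx
    have hmem : x ∈ (pvUniv start).filter (fun y => y ∉ v) := by
      simp only [Finset.mem_filter]
      exact ⟨(hx x (by simp)).1, (hx x (by simp)).2⟩
    have hstep : pvUnseen start (v ++ [x]) + 1 = pvUnseen start v := by
      have hfe : (pvUniv start).filter (fun y => y ∉ v ++ [x])
          = ((pvUniv start).filter (fun y => y ∉ v)).erase x := by
        ext y
        simp only [Finset.mem_filter, Finset.mem_erase, List.mem_append, List.mem_singleton]
        tauto
      have hcard := Finset.card_erase_of_mem hmem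
      have hpos : 0 < ((pvUniv start).filter (fun y => y ∉ v)).card :=
        Finset.card_pos.2 ⟨x, hmem⟩
      unfold pvUnseen
      rw [hfe, hcard]
      omega
    have := ih (v ++ [x]) hnd.of_cons (by
      intro y hy
      refine ⟨(hx y (by simp [hy])).1, ?_⟩
      simp only [List.mem_append, List.mem_singleton]
      push_neg
      exact ⟨(hx y (by simp [hy])).2, by
        rintro rfl
        exact (List.nodup_cons.1 hnd).1 hy⟩)
    have hassoc : v ++ x :: xs = (v ++ [x]) ++ xs := by simp
    rw [hassoc]
    simp only [List.length_cons]
    omega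

lemma pvUnseen_anti {start : String} {v v' : List String} (h : v ⊆ v') :
    pvUnseen start v' ≤ pvUnseen start v := by
  apply Finset.card_le_card
  intro x hx
  simp only [Finset.mem_filter] at hx ⊢
  exact ⟨hx.1, fun hc => hx.2 (h hc)⟩

-- ---- the shared mark-and-collect loop, in closed form ----

lemma contains_perm_eq {vA vB : List String} (h : vA.Perm vB) (x : String) :
    PySem.Set.contains vA x = PySem.Set.contains vB x := by
  simp only [PySem.Set.contains_eq_listContains]
  by_cases hx : x ∈ vA
  · simp [List.contains_iff_mem, hx, h.mem_iff.1 hx]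
  · have hb : x ∉ vB := fun hc => hx (h.mem_iff.2 hc)
    simp [List.contains_iff_mem, hx, hb]

lemma pvMarkfold {β : Type} (g : (String × String) → β) :
    ∀ (l : List (String × String)) (acc : List β) (v : PySem.Set String),
    (List.map Prod.snd l).Nodup →
    l.foldl (fun sv mn =>
        if PySem.Set.contains sv.2 mn.2 then sv
        else (sv.1 ++ [g mn], PySem.Set.add sv.2 mn.2)) (acc, v)
    = (acc ++ (l.filter (fun mn => !PySem.Set.contains v mn.2)).map g,
       v ++ List.map Prod.snd (l.filter (fun mn => !PySem.Set.contains v mn.2))) := by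
  intro l
  induction l with
  | nil => intro acc v _; simp
  | cons mn l ih =>
    intro acc v hnd
    have hnd' : (List.map Prod.snd l).Nodup := (List.nodup_cons.1 hnd).2
    have hhd : mn.2 ∉ List.map Prod.snd l := (List.nodup_cons.1 hnd).1
    rw [List.foldl_cons, List.filter_cons]
    cases hc : PySem.Set.contains v mn.2 with
    | true =>
      simpa using ih acc v hnd'
    | false =>
      have hvm : mn.2 ∉ v := by
        have hc' := hc
        rw [PySem.Set.contains_eq_listContains] at hc'
        simpa using hc'
      have hadd : PySem.Set.add v mn.2 = v ++ [mn.2] := by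
        simp [PySem.Set.add, hvm]
      simp only [Bool.false_eq_true, Bool.not_false, if_false, if_true]
      rw [hadd, ih (acc ++ [g mn]) (v ++ [mn.2]) hnd']
      have hfeq : l.filter (fun x => !PySem.Set.contains (v ++ [mn.2]) x.2)
          = l.filter (fun x => !PySem.Set.contains v x.2) := by
        apply List.filter_congr
        intro x hxl
        have hxne : x.2 ≠ mn.2 := by
          intro hxe
          exact hhd (hxe ▸ List.mem_map_of_mem hxl)
        simp only [PySem.Set.contains_eq_listContains, List.contains_append, Bool.not_or]
        have hone : List.contains [mn.2] x.2 = false := by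
          simp [hxne]
        simp only [hone, Bool.not_false, Bool.and_true]
      rw [hfeq]
      simp

def pvARes (goal : String) (stack : List (String × List (String × String)))
    (v : PySem.Set String) (r : Option (List (String × String))) : Prop :=
  ∃ f, loopA goal f stack v = some r

lemma loopA_mono {goal} : ∀ {f stack v r}, loopA goal f stack v = some r →
    loopA goal (f+1) stack v = some r := by
  intro f
  induction f with
  | zero => intro stack v r h; simp [loopA] at h
  | succ n ih =>
    intro stack v r h
    rw [loopA] at h ⊢
    cases hp : PySem.List.pop? stack with
    | none => rw [hp] at h; exact h
    | some fr =>
      obtain ⟨⟨state, path⟩, stack'⟩ := fr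
      rw [hp] at h
      dsimp only at h ⊢
      by_cases hg : state = goal
      · simp only [hg, if_true] at h ⊢; exact h
      · simp only [hg, if_false] at h ⊢
        exact ih h

lemma loopA_mono_le {goal f f' stack v r} (hle : f ≤ f') (h : loopA goal f stack v = some r) :
    loopA goal f' stack v = some r := by
  induction f', hle using Nat.le_induction with
  | base => exact h
  | succ n hn ih => exact loopA_mono ih

-- ---- adequacy of the fuel guards ----

lemma pvLoopA_adequate {start goal : String} : ∀ (f : Nat) (stack) (v : PySem.Set String),
    (∀ fr ∈ stack, (Prod.fst fr).toList.Perm start.toList) →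
    2 * pvUnseen start v + stack.length < f →
    ∃ r, loopA goal f stack v = some r := by
  intro f
  induction f with
  | zero => intro stack v _ hb; omega
  | succ f ih =>
    intro stack v hinv hb
    rcases List.eq_nil_or_concat stack with rfl | ⟨rest, fr, rfl⟩
    · refine ⟨none, ?_⟩
      rw [loopA]
      rfl
    · obtain ⟨state, path⟩ := fr
      rw [List.concat_eq_append] at hinv hb ⊢
      by_cases hg : state = goal
      · refine ⟨some path, ?_⟩
        rw [loopA, PySem.List.pop?_last]
        simp [hg]
      · have hperm_state : state.toList.Perm start.toList := hinv (state, path) (by simp)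
        have hnd : (List.map Prod.snd ((nextStates state).reverse)).Nodup := by
          rw [List.map_reverse]
          exact List.nodup_reverse.2 (nextStates_snd_nodup state)
        have hfold := pvMarkfold (fun mn => (mn.2, path ++ [mn]))
          ((nextStates state).reverse) rest v hnd
        set kept := ((nextStates state).reverse).filter
          (fun mn => !PySem.Set.contains v mn.2) with hk
        have hkept_ns : ∀ mn ∈ kept, mn ∈ nextStates state := by
          intro mn hmn
          exact List.mem_reverse.1 (List.mem_of_mem_filter hmn)
        have hmarks_nodup : (List.map Prod.snd kept).Nodup :=
          hnd.sublist (List.Sublist.map Prod.snd List.filter_sublist)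
        have hcond : ∀ x ∈ List.map Prod.snd kept, x ∈ pvUniv start ∧ x ∉ v := by
          intro x hx
          obtain ⟨mn, hmn, rfl⟩ := List.mem_map.1 hx
          constructor
          · exact mem_pvUniv.2 ((nextStates_perm (hkept_ns mn hmn)).trans hperm_state)
          · have hcf := List.of_mem_filter hmn
            simp only [Bool.not_eq_true', PySem.Set.contains_eq_listContains] at hcf
            simpa using hcf
        have hUn := pvUnseen_append (List.map Prod.snd kept) v hmarks_nodup hcond
        have hinv' : ∀ fr2 ∈ rest ++ kept.map (fun mn => (mn.2, path ++ [mn])),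
            (Prod.fst fr2).toList.Perm start.toList := by
          intro fr2 hfr2
          rcases List.mem_append.1 hfr2 with hfr2 | hfr2
          · exact hinv _ (List.mem_append.2 (Or.inl hfr2))
          · obtain ⟨mn, hmn, rfl⟩ := List.mem_map.1 hfr2
            exact (nextStates_perm (hkept_ns mn hmn)).trans hperm_state
        have hb' : 2 * pvUnseen start (v ++ List.map Prod.snd kept) +
            (rest ++ kept.map (fun mn => (mn.2, path ++ [mn]))).length < f := by
          simp only [List.length_append, List.length_map, List.length_cons,
            List.length_nil] at hb ⊢
          have hlm : (List.map Prod.snd kept).length = kept.length := by simp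
          omega
        obtain ⟨r, hr⟩ := ih _ _ hinv' hb'
        refine ⟨r, ?_⟩
        rw [loopA, PySem.List.pop?_last]
        simp only [hg, if_false]
        rw [hfold]
        exact hr

def PvBAdq (f : Nat) : Prop := ∀ (start goal state : String) path (v : PySem.Set String),
  state.toList.Perm start.toList → pvUnseen start v < f → (recB goal f state path v).isSome
def PvTAdq (f : Nat) : Prop := ∀ (start goal : String) cs path (v : PySem.Set String),
  (∀ mn ∈ cs, (Prod.snd mn).toList.Perm start.toList) → pvUnseen start v < f →
  (tryB goal f cs path v).isSome

lemma pvSet_add_subset (v : PySem.Set String) (x : String) : v ⊆ PySem.Set.add v x := by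
  simp only [PySem.Set.add]
  split_ifs
  · exact fun a ha => ha
  · exact List.subset_append_left _ _

lemma pvFoldV_subset {β : Type} (g : (String × String) → β) :
    ∀ (l : List (String × String)) (acc : List β) (v : PySem.Set String),
    v ⊆ (l.foldl (fun sv mn =>
        if PySem.Set.contains sv.2 mn.2 then sv
        else (sv.1 ++ [g mn], PySem.Set.add sv.2 mn.2)) (acc, v)).2 := by
  intro l
  induction l with
  | nil => intro acc v; exact fun a ha => ha
  | cons mn l ih =>
    intro acc v
    rw [List.foldl_cons]
    cases hc : PySem.Set.contains v mn.2 with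
    | true => exact ih acc v
    | false =>
      dsimp only
      exact (pvSet_add_subset v mn.2).trans (ih (acc ++ [g mn]) (PySem.Set.add v mn.2))

lemma collectB_subset (v : PySem.Set String) (l : List (String × String)) :
    v ⊆ (collectB v l).2 := by
  unfold collectB
  exact pvFoldV_subset (fun mn => mn) l [] v

lemma pvRecB_subset : ∀ (f : Nat),
    (∀ (goal state : String) path v r v', recB goal f state path v = some (r, v') → v ⊆ v') ∧
    (∀ (goal : String) cs path v r v', tryB goal f cs path v = some (r, v') → v ⊆ v') := by
  intro f
  induction f with
  | zero =>
    constructor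
    · intro goal state path v r v' h
      rw [recB] at h
      exact absurd h (by simp)
    · intro goal cs path v r v' h
      cases cs with
      | nil =>
        rw [tryB] at h
        obtain ⟨rfl, rfl⟩ := (Prod.mk.injEq _ _ _ _).mp (Option.some.inj h)
        exact fun a ha => ha
      | cons mn cs =>
        rw [tryB, recB] at h
        exact absurd h (by simp)
  | succ f ih =>
    have hrec : ∀ (goal state : String) path v r v',
        recB goal (f+1) state path v = some (r, v') → v ⊆ v' := by
      intro goal state path v r v' h
      rw [recB] at h
      by_cases hg : state = goal
      · rw [if_pos hg] at h
        obtain ⟨rfl, rfl⟩ := (Prod.mk.injEq _ _ _ _).mp (Option.some.inj h)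
        exact fun a ha => ha
      · rw [if_neg hg] at h
        exact (collectB_subset v (nextStates state)).trans (ih.2 _ _ _ _ _ _ h)
    refine ⟨hrec, ?_⟩
    intro goal cs
    induction cs with
    | nil =>
      intro path v r v' h
      rw [tryB] at h
      obtain ⟨rfl, rfl⟩ := (Prod.mk.injEq _ _ _ _).mp (Option.some.inj h)
      exact fun a ha => ha
    | cons mn cs ihc =>
      intro path v r v' h
      rw [tryB] at h
      cases hr : recB goal (f+1) mn.2 (path ++ [mn]) v with
      | none => rw [hr] at h; exact absurd h (by simp)
      | some rv =>
        obtain ⟨rc, v1⟩ := rv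
        rw [hr] at h
        have hv1 := hrec _ _ _ _ _ _ hr
        cases rc with
        | some p =>
          dsimp only at h
          obtain ⟨rfl, rfl⟩ := (Prod.mk.injEq _ _ _ _).mp (Option.some.inj h)
          exact hv1
        | none =>
          dsimp only at h
          exact hv1.trans (ihc _ _ _ _ h)

lemma collectB_eq (v : PySem.Set String) (l : List (String × String))
    (hnd : (List.map Prod.snd l).Nodup) :
    collectB v l = (l.filter (fun mn => !PySem.Set.contains v mn.2),
      v ++ List.map Prod.snd (l.filter (fun mn => !PySem.Set.contains v mn.2))) := by
  unfold collectB
  simpa using pvMarkfold (fun mn => mn) l [] v hnd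

lemma pvRecB_adequate : ∀ f, PvBAdq f ∧ PvTAdq f := by
  intro f
  induction f with
  | zero =>
    constructor
    · intro start goal state path v _ hun
      omega
    · intro start goal cs path v hperm hun
      cases cs with
      | nil => rw [tryB]; rfl
      | cons mn cs => omega
  | succ f ih =>
    have hB : PvBAdq (f+1) := by
      intro start goal state path v hperm hun
      rw [recB]
      by_cases hg : state = goal
      · rw [if_pos hg]; rfl
      · rw [if_neg hg]
        dsimp only
        have hnd := nextStates_snd_nodup state
        rw [collectB_eq v _ hnd]
        dsimp only
        set kept := (nextStates state).filter (fun mn => !PySem.Set.contains v mn.2) with hk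
        have hkept_ns : ∀ mn ∈ kept, mn ∈ nextStates state := by
          intro mn hmn; exact List.mem_of_mem_filter hmn
        cases hke : kept with
        | nil => rw [tryB]; rfl
        | cons mn0 cs0 =>
          have hmarks_nodup : (List.map Prod.snd kept).Nodup :=
            hnd.sublist (List.Sublist.map Prod.snd List.filter_sublist)
          have hcond : ∀ x ∈ List.map Prod.snd kept, x ∈ pvUniv start ∧ x ∉ v := by
            intro x hx
            obtain ⟨mn, hmn, rfl⟩ := List.mem_map.1 hx
            refine ⟨mem_pvUniv.2 ((nextStates_perm (hkept_ns mn hmn)).trans hperm), ?_⟩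
            have hcf := List.of_mem_filter hmn
            simp only [Bool.not_eq_true', PySem.Set.contains_eq_listContains] at hcf
            simpa using hcf
          have hUn := pvUnseen_append (List.map Prod.snd kept) v hmarks_nodup hcond
          rw [← hke]
          apply ih.2
          · intro mn hmn
            exact (nextStates_perm (hkept_ns mn hmn)).trans hperm
          · have hlen : (List.map Prod.snd kept).length = kept.length := by simp
            have hpos : 1 ≤ kept.length := by rw [hke]; simp
            omega
    refine ⟨hB, ?_⟩
    intro start goal cs
    induction cs with
    | nil => intro path v _ _; rw [tryB]; rfl
    | cons mn cs ihc =>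
      intro path v hperm hun
      rw [tryB]
      have hr := hB start goal mn.2 (path ++ [mn]) v (hperm mn (by simp)) hun
      cases hrec : recB goal (f+1) mn.2 (path ++ [mn]) v with
      | none => rw [hrec] at hr; simp at hr
      | some rv =>
        obtain ⟨rc, v1⟩ := rv
        cases rc with
        | some p => rfl
        | none =>
          dsimp only
          apply ihc path v1 (fun x hx => hperm x (by simp [hx]))
          have hsub := (pvRecB_subset (f+1)).1 _ _ _ _ _ _ hrec
          have := pvUnseen_anti (start := start) hsub
          omega

-- ---- the bridge: B's recursion simulates A's stack loop ----

def PvL1 (f : Nat) : Prop := ∀ (goal state : String) (path : List (String × String)) (vB : PySem.Set String) r vB' (vA : PySem.Set String),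
  recB goal f state path vB = some (r, vB') → vA.Perm vB →
  ∃ vA' : PySem.Set String, vA'.Perm vB' ∧ ∀ rest,
    (∀ p, r = some p → pvARes goal (rest ++ [(state, path)]) vA (some p)) ∧
    (r = none → ∀ r2, pvARes goal rest vA' r2 → pvARes goal (rest ++ [(state, path)]) vA r2)

def PvL2 (f : Nat) : Prop := ∀ (goal : String) (cs path : List (String × String)) (vB : PySem.Set String) r vB' (vA : PySem.Set String),
  tryB goal f cs path vB = some (r, vB') → vA.Perm vB →
  ∃ vA' : PySem.Set String, vA'.Perm vB' ∧ ∀ rest,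
    (∀ p, r = some p →
      pvARes goal (rest ++ (cs.map (fun mn => (mn.2, path ++ [mn]))).reverse) vA (some p)) ∧
    (r = none → ∀ r2, pvARes goal rest vA' r2 →
      pvARes goal (rest ++ (cs.map (fun mn => (mn.2, path ++ [mn]))).reverse) vA r2)

lemma pvL2_of_L1 (f : Nat) (hL1 : PvL1 f) : PvL2 f := by
  intro goal cs
  induction cs with
  | nil =>
    intro path vB r vB' vA h hperm
    rw [tryB] at h
    obtain ⟨rfl, rfl⟩ := (Prod.mk.injEq _ _ _ _).mp (Option.some.inj h)
    refine ⟨vA, hperm, ?_⟩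
    intro rest
    constructor
    · intro p hp; exact absurd hp (by simp)
    · intro _ r2 hres
      simpa using hres
  | cons mn cs ihc =>
    intro path vB r vB' vA h hperm
    rw [tryB] at h
    cases hrec : recB goal f mn.2 (path ++ [mn]) vB with
    | none => rw [hrec] at h; exact absurd h (by simp)
    | some rv =>
      obtain ⟨rc, v1⟩ := rv
      rw [hrec] at h
      obtain ⟨vA1, hpermA1, hprops⟩ := hL1 goal mn.2 (path ++ [mn]) vB rc v1 vA hrec hperm
      cases rc with
      | some p =>
        dsimp only at h
        obtain ⟨rfl, rfl⟩ := (Prod.mk.injEq _ _ _ _).mp (Option.some.inj h)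
        refine ⟨vA1, hpermA1, ?_⟩
        intro rest
        constructor
        · intro q hq
          obtain rfl := Option.some.inj hq
          have hx := (hprops (rest ++ (cs.map (fun mn => (mn.2, path ++ [mn]))).reverse)).1 _ rfl
          simpa [List.append_assoc] using hx
        · intro hq; exact absurd hq (by simp)
      | none =>
        dsimp only at h
        obtain ⟨vA2, hpermA2, hprops2⟩ := ihc path v1 r vB' vA1 h hpermA1
        refine ⟨vA2, hpermA2, ?_⟩
        intro rest
        constructor
        · intro p hp
          have hx := (hprops2 rest).1 p hp
          have hy := (hprops (rest ++ (cs.map (fun mn => (mn.2, path ++ [mn]))).reverse)).2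
            rfl (some p) hx
          simpa [List.append_assoc] using hy
        · intro hr2 r2 hres
          have h1 := (hprops2 rest).2 hr2 r2 hres
          have h2 := (hprops (rest ++ (cs.map (fun mn => (mn.2, path ++ [mn]))).reverse)).2
            rfl r2 h1
          simpa [List.append_assoc] using h2

lemma pvL1_all : ∀ f, PvL1 f := by
  intro f
  induction f with
  | zero =>
    intro goal state path vB r vB' vA h _
    rw [recB] at h
    exact absurd h (by simp)
  | succ f ih =>
    have hL2 := pvL2_of_L1 f ih
    intro goal state path vB r vB' vA h hperm
    rw [recB] at h
    by_cases hg : state = goal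
    · rw [if_pos hg] at h
      obtain ⟨rfl, rfl⟩ := (Prod.mk.injEq _ _ _ _).mp (Option.some.inj h)
      refine ⟨vA, hperm, ?_⟩
      intro rest
      constructor
      · intro p hp
        obtain rfl := Option.some.inj hp
        refine ⟨1, ?_⟩
        rw [loopA, PySem.List.pop?_last]
        simp [hg]
      · intro hr; exact absurd hr (by simp)
    · rw [if_neg hg] at h
      dsimp only at h
      have hnd := nextStates_snd_nodup state
      rw [collectB_eq vB _ hnd] at h
      dsimp only at h
      have hndr : (List.map Prod.snd ((nextStates state).reverse)).Nodup := by
        rw [List.map_reverse]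
        exact List.nodup_reverse.2 hnd
      have hfeq : (nextStates state).filter (fun mn => !PySem.Set.contains vA mn.2)
          = (nextStates state).filter (fun mn => !PySem.Set.contains vB mn.2) := by
        apply List.filter_congr
        intro x _
        rw [contains_perm_eq hperm]
      have hkeq : ((nextStates state).reverse).filter (fun mn => !PySem.Set.contains vA mn.2)
          = ((nextStates state).filter (fun mn => !PySem.Set.contains vB mn.2)).reverse := by
        rw [List.filter_reverse, hfeq]
      set keptB := (nextStates state).filter (fun mn => !PySem.Set.contains vB mn.2) with hkB
      have hpermA2 : (vA ++ List.map Prod.snd keptB.reverse).Perm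
          (vB ++ List.map Prod.snd keptB) := by
        refine List.Perm.append hperm ?_
        rw [List.map_reverse]
        exact List.reverse_perm _
      obtain ⟨vA', hpermA', hprops2⟩ := hL2 goal keptB path
        (vB ++ List.map Prod.snd keptB) r vB' (vA ++ List.map Prod.snd keptB.reverse) h hpermA2
      refine ⟨vA', hpermA', ?_⟩
      intro rest
      have hstep : ∀ fa, loopA goal (fa+1) (rest ++ [(state, path)]) vA
          = loopA goal fa (rest ++ (keptB.map (fun mn => (mn.2, path ++ [mn]))).reverse)
              (vA ++ List.map Prod.snd keptB.reverse) := by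
        intro fa
        rw [loopA, PySem.List.pop?_last]
        simp only [hg, if_false]
        rw [pvMarkfold (fun mn => (mn.2, path ++ [mn])) ((nextStates state).reverse) rest vA hndr]
        rw [hkeq]
        rw [List.map_reverse]
      constructor
      · intro p hp
        obtain ⟨fa, hfa⟩ := (hprops2 rest).1 p hp
        exact ⟨fa + 1, by rw [hstep fa]; exact hfa⟩
      · intro hr r2 hres
        obtain ⟨fa, hfa⟩ := (hprops2 rest).2 hr r2 hres
        exact ⟨fa + 1, by rw [hstep fa]; exact hfa⟩

-- ===== VERDICT (by name: the statement is the Claim_ definition above) =====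
theorem dfs_spec : Claim_equal_dfs := by
  intro start goal _ _
  show dfs start goal = dfs_alt start goal
  have hBadq := (pvRecB_adequate (start.length ^ start.length + 1)).1 start goal start []
      (PySem.Set.ofList [start]) (List.Perm.refl _)
      (by have := pvUnseen_le_pow start (PySem.Set.ofList [start]); omega)
  cases hB : recB goal (start.length ^ start.length + 1) start [] (PySem.Set.ofList [start]) with
  | none => rw [hB] at hBadq; simp at hBadq
  | some rv =>
    obtain ⟨r, vB'⟩ := rv
    obtain ⟨vA', hpermA', hprops⟩ := pvL1_all _ goal start [] (PySem.Set.ofList [start]) r vB'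
        (PySem.Set.ofList [start]) hB (List.Perm.refl _)
    have hARes : pvARes goal [(start, [])] (PySem.Set.ofList [start]) r := by
      cases r with
      | some p =>
        have hx := (hprops []).1 p rfl
        simpa using hx
      | none =>
        have hnil : pvARes goal [] vA' none := ⟨1, by rw [loopA]; rfl⟩
        have hx := (hprops []).2 rfl none hnil
        simpa using hx
    obtain ⟨fa, hfa⟩ := hARes
    obtain ⟨r2, hr2⟩ := pvLoopA_adequate (start := start) (goal := goal)
        (2 * start.length ^ start.length + 2) [(start, [])] (PySem.Set.ofList [start])
        (by
          intro fr hfr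
          rw [List.mem_singleton] at hfr
          subst hfr
          exact List.Perm.refl _)
        (by
          have := pvUnseen_le_pow start (PySem.Set.ofList [start])
          simp only [List.length_cons, List.length_nil]
          omega)
    have hmax1 : loopA goal (max fa (2 * start.length ^ start.length + 2)) [(start, [])]
        (PySem.Set.ofList [start]) = some r := loopA_mono_le (le_max_left _ _) hfa
    have hmax2 : loopA goal (max fa (2 * start.length ^ start.length + 2)) [(start, [])]
        (PySem.Set.ofList [start]) = some r2 := loopA_mono_le (le_max_right _ _) hr2
    have hrr : r2 = r := by
      rw [hmax1] at hmax2
      exact (Option.some.inj hmax2).symm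
    unfold dfs dfs_alt
    rw [hr2, hB]
    dsimp only
    exact hrr
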